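-- pv_equiv track=rewrite | github.com/xiaojie2018/nlp_study | ner/language_ner/utils.py | get_extract_item
-- ===== SOURCE A (Python) =====
-- def get_extract_item(start_logits, end_logits):
--     S = []
--     start_pred = [x.index(max(x)) for x in start_logits]
--     end_pred = [x.index(max(x)) for x in end_logits]
--
--     for i, s_1 in enumerate(start_pred):
--         if s_1 == 0:
--             continue
--
--         for j, e_1 in enumerate(end_pred[i:]):
--             if s_1 == e_1:
--                 S.append((s_1, i, i + j))
--                 break
--
--     return S
-- ===== SOURCE B (Python) =====
-- def get_extract_item(start_logits, end_logits):
--     start_pred = [x.index(max(x)) for x in start_logits]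
--     end_pred = [x.index(max(x)) for x in end_logits]
--     next_pos = {}  # label -> smallest position >= current i with that end label
--     out = []
--     for i in range(max(len(start_pred), len(end_pred)) - 1, -1, -1):
--         if i < len(end_pred):
--             next_pos[end_pred[i]] = i
--         if i < len(start_pred):
--             s = start_pred[i]
--             if s != 0 and s in next_pos:
--                 out.append((s, i, next_pos[s]))
--     out.reverse()
--     return out
-- ===== Notes on version B (the rewrite author's own statement) =====
-- stated objective: alternative
-- what changed: A rescans end_pred[i:] for every nonzero start label (worst-case quadratic); B makes a single backward pass that maintains a dict mapping each end label to its next position at or after the current index, so each start is resolved by one dict lookup.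
import Mathlib
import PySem

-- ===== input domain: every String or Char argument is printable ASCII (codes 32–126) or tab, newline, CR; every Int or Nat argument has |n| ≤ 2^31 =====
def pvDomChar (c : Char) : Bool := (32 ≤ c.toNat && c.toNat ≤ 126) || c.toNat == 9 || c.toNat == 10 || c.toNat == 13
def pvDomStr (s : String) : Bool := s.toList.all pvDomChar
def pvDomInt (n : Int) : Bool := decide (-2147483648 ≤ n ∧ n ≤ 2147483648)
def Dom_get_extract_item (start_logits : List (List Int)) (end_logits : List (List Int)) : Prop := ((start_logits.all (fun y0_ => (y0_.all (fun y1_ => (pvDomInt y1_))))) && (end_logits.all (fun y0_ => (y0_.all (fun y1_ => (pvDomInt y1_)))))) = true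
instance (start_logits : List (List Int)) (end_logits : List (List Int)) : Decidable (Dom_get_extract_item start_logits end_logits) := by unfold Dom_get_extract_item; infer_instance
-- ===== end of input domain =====

-- B replaces A's per-start rescan of end_pred with one backward pass maintaining a dict
-- 'label -> next end position at or after the current index' (objective: alternative).

-- shared helper: x.index(max(x))  (both Pythons compute the predictions this way;
-- the fallback branches are unreachable under Pre_, where every row is nonempty)
def pvArgmax (x : List Int) : Int :=
  match PySem.List.max? x (fun v => v) with
  | some m => ((PySem.List.index? x m).getD 0 : Nat)
  | none => 0

-- ===== PORT A =====
-- inner loop: for j, e in enumerate(end_pred[i:]): if s == e: append (s, i, i+j); break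
def pvInnerA (s : Int) (i : Int) : List (Int × Int) → Option (Int × Int × Int)
  | [] => none
  | (j, e) :: rest => if s = e then some (s, i, i + j) else pvInnerA s i rest

def get_extract_item (start_logits : List (List Int)) (end_logits : List (List Int)) : List (Int × Int × Int) :=
  let start_pred := start_logits.map pvArgmax
  let end_pred := end_logits.map pvArgmax
  (PySem.List.enumerate start_pred 0).foldl
    (fun (S : List (Int × Int × Int)) (p : Int × Int) =>
      if p.2 = 0 then S
      else
        match pvInnerA p.2 p.1 (PySem.List.enumerate (PySem.List.slice end_pred (some p.1) none) 0) with
        | some t => S ++ [t]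
        | none => S) []

-- ===== PORT B =====
def get_extract_item_alt (start_logits : List (List Int)) (end_logits : List (List Int)) : List (Int × Int × Int) :=
  let start_pred := start_logits.map pvArgmax
  let end_pred := end_logits.map pvArgmax
  let res := (PySem.List.pyRange ((max start_pred.length end_pred.length : Nat) - 1 : Int) (-1) (-1)).foldl
    (fun (st : PySem.Dict Int Int × List (Int × Int × Int)) (i : Int) =>
      let np := if i < (end_pred.length : Int) then st.1.insert (PySem.List.pyGetD end_pred i 0) i else st.1
      let out := if i < (start_pred.length : Int) then
          let s := PySem.List.pyGetD start_pred i 0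
          if s ≠ 0 ∧ np.contains s then st.2 ++ [(s, i, np.getD s 0)] else st.2
        else st.2
      (np, out)) (PySem.Dict.empty, [])
  res.2.reverse

-- ===== PRECONDITION & SPEC =====
-- Python A raises ValueError (max of an empty sequence) iff some row is empty; excluded.
def Pre_get_extract_item (start_logits : List (List Int)) (end_logits : List (List Int)) : Prop :=
  (start_logits.all (fun x => !x.isEmpty) && end_logits.all (fun x => !x.isEmpty)) = true
instance (start_logits : List (List Int)) (end_logits : List (List Int)) : Decidable (Pre_get_extract_item start_logits end_logits) := by unfold Pre_get_extract_item; infer_instance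
def pvWitness_get_extract_item : List (List Int) × List (List Int) := ([[0, 1], [2, 0]], [[0, 1], [0, 2]])

def Spec_get_extract_item (start_logits : List (List Int)) (end_logits : List (List Int)) (out : List (Int × Int × Int)) : Prop := out = get_extract_item_alt start_logits end_logits
instance (start_logits : List (List Int)) (end_logits : List (List Int)) (out : List (Int × Int × Int)) : Decidable (Spec_get_extract_item start_logits end_logits out) := by unfold Spec_get_extract_item; infer_instance

-- ===== CLAIM (what is proved, stated in full; the proofs are below) =====
def Claim_equal_get_extract_item : Prop := ∀ (start_logits : List (List Int)) (end_logits : List (List Int)), Dom_get_extract_item start_logits end_logits → Pre_get_extract_item start_logits end_logits → Spec_get_extract_item start_logits end_logits (get_extract_item start_logits end_logits)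

-- ===== LEMMAS AND PROOFS =====

-- first end position ≥ n whose predicted label is s
def pvFm (ep : List Int) (s : Int) (n : Nat) : Option Nat :=
  ((ep.drop n).findIdx? (fun e => s == e)).map (n + ·)

-- the item contributed by start position n (none if no entity starts there)
def pvHit (sp ep : List Int) (n : Nat) : Option (Int × Int × Int) :=
  if n < sp.length then
    (if sp.getD n 0 = 0 then none
     else (pvFm ep (sp.getD n 0) n).map (fun k => (sp.getD n 0, (n : Int), (k : Int))))
  else none

lemma pvInnerA_enumerate (s : Int) (i : Int) (l : List Int) (j : Int) :
    pvInnerA s i (PySem.List.enumerate l j)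
      = (l.findIdx? (fun e => s == e)).map (fun k => (s, i, i + (j + (k : Int)))) := by
  induction l generalizing j with
  | nil => simp [pvInnerA, PySem.List.enumerate_nil, List.findIdx?_nil]
  | cons e rest ih =>
      rw [PySem.List.enumerate_cons]
      by_cases h : s = e
      · simp [pvInnerA, h, List.findIdx?_cons]
      · simp only [pvInnerA, if_neg h, List.findIdx?_cons]
        have hb : (s == e) = false := by simp [h]
        rw [hb]
        simp only [ih]
        cases rest.findIdx? (fun e => s == e) with
        | none => simp
        | some k => simp; omega

lemma pvAfold (sp ep : List Int) (n : Nat) (acc : List (Int × Int × Int)) (hn : n ≤ sp.length) :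
    (PySem.List.enumerate (sp.drop n) (n : Int)).foldl
      (fun (S : List (Int × Int × Int)) (p : Int × Int) =>
        if p.2 = 0 then S
        else
          match pvInnerA p.2 p.1 (PySem.List.enumerate (PySem.List.slice ep (some p.1) none) 0) with
          | some t => S ++ [t]
          | none => S) acc
      = acc ++ (List.range' n (sp.length - n)).filterMap (pvHit sp ep) := by
  induction hk : sp.length - n generalizing n acc with
  | zero =>
      have hn' : sp.length ≤ n := by omega
      rw [List.drop_eq_nil_of_le hn']
      simp [PySem.List.enumerate_nil]
  | succ k ih =>
      have hlt : n < sp.length := by omega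
      rw [List.drop_eq_getElem_cons hlt, PySem.List.enumerate_cons, List.foldl_cons]
      have hstep :
          (if (((n : Int), sp[n]) : Int × Int).2 = 0 then acc
           else
             match pvInnerA (((n : Int), sp[n]) : Int × Int).2 (((n : Int), sp[n]) : Int × Int).1
                 (PySem.List.enumerate (PySem.List.slice ep (some (((n : Int), sp[n]) : Int × Int).1)) 0) with
             | some t => acc ++ [t]
             | none => acc) = acc ++ (pvHit sp ep n).toList := by
        show (if sp[n] = 0 then acc
           else
             match pvInnerA sp[n] (n : Int) (PySem.List.enumerate (PySem.List.slice ep (some (n : Int)) none) 0) with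
             | some t => acc ++ [t]
             | none => acc) = acc ++ (pvHit sp ep n).toList
        have hg : sp.getD n 0 = sp[n] := List.getD_eq_getElem sp 0 hlt
        by_cases h0 : sp[n] = 0
        · simp [pvHit, hlt, h0]
        · rw [if_neg h0, PySem.List.slice_from_natCast, pvInnerA_enumerate]
          simp only [pvHit, if_pos hlt, hg, if_neg h0, pvFm]
          cases (ep.drop n).findIdx? (fun e => sp[n] == e) with
          | none => simp
          | some k2 => simp
      rw [hstep]
      have hc : ((n : Int) + 1) = ((n + 1 : Nat) : Int) := by push_cast; ring
      rw [hc, ih (n + 1) _ (by omega) (by omega)]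
      rw [List.range'_succ, List.filterMap_cons]
      cases pvHit sp ep n <;> simp

lemma pvBfold (sp ep : List Int) (m : Nat) (d : PySem.Dict Int Int) (out : List (Int × Int × Int))
    (hd : ∀ v, d.get? v = (pvFm ep v m).map (fun k => (k : Int))) :
    ((PySem.List.pyRange ((m : Int) - 1) (-1) (-1)).foldl
      (fun (st : PySem.Dict Int Int × List (Int × Int × Int)) (i : Int) =>
        let np := if i < (ep.length : Int) then st.1.insert (PySem.List.pyGetD ep i 0) i else st.1
        let out := if i < (sp.length : Int) then
            let s := PySem.List.pyGetD sp i 0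
            if s ≠ 0 ∧ np.contains s then st.2 ++ [(s, i, np.getD s 0)] else st.2
          else st.2
        (np, out)) (d, out)).2
      = out ++ ((List.range' 0 m).filterMap (pvHit sp ep)).reverse := by
  induction m generalizing d out with
  | zero =>
      have h0 : ((0 : Nat) : Int) - 1 = -1 := by norm_num
      rw [h0, PySem.List.pyRange_neg_one_eq_nil le_rfl]
      simp
  | succ m ih =>
      have hc : ((m + 1 : Nat) : Int) - 1 = (m : Int) := by push_cast; ring
      rw [hc, PySem.List.pyRange_neg_one_cons (by omega : (-1 : Int) < (m : Int)), List.foldl_cons]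
      have hd' : ∀ v,
          (if (m : Int) < (ep.length : Int) then d.insert (PySem.List.pyGetD ep (m : Int) 0) (m : Int) else d).get? v
            = (pvFm ep v m).map (fun k => (k : Int)) := by
        intro v
        by_cases hm : m < ep.length
        · have hml : ((m : Int) < (ep.length : Int)) := by exact_mod_cast hm
          rw [if_pos hml]
          have hget : PySem.List.pyGetD ep (m : Int) 0 = ep[m] := by
            rw [PySem.List.pyGetD_natCast]; exact List.getD_eq_getElem ep 0 hm
          rw [hget, PySem.Dict.get?_insert]
          unfold pvFm
          rw [List.drop_eq_getElem_cons hm, List.findIdx?_cons]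
          by_cases hv : v = ep[m]
          · have hbe : (v == ep[m]) = true := by simp [hv]
            rw [hbe]; simp [hv]
          · have hbe : (v == ep[m]) = false := by simp [hv]
            rw [hbe]
            simp only [if_neg hv]
            rw [hd v]
            unfold pvFm
            cases (ep.drop (m + 1)).findIdx? (fun e => v == e) with
            | none => simp
            | some k => simp; omega
        · have hml : ¬ ((m : Int) < (ep.length : Int)) := by exact_mod_cast hm
          rw [if_neg hml, hd v]
          unfold pvFm
          rw [List.drop_eq_nil_of_le (by omega), List.drop_eq_nil_of_le (by omega)]
          simp
      show (List.foldl
          (fun (st : PySem.Dict Int Int × List (Int × Int × Int)) (i : Int) =>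
            let np := if i < (ep.length : Int) then st.1.insert (PySem.List.pyGetD ep i 0) i else st.1
            let out := if i < (sp.length : Int) then
                let s := PySem.List.pyGetD sp i 0
                if s ≠ 0 ∧ np.contains s then st.2 ++ [(s, i, np.getD s 0)] else st.2
              else st.2
            (np, out))
          ((if (m : Int) < (ep.length : Int) then d.insert (PySem.List.pyGetD ep (m : Int) 0) (m : Int) else d),
           (if (m : Int) < (sp.length : Int) then
             (if PySem.List.pyGetD sp (m : Int) 0 ≠ 0 ∧
                 (if (m : Int) < (ep.length : Int) then d.insert (PySem.List.pyGetD ep (m : Int) 0) (m : Int) else d).contains (PySem.List.pyGetD sp (m : Int) 0)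
              then out ++ [(PySem.List.pyGetD sp (m : Int) 0, (m : Int),
                 (if (m : Int) < (ep.length : Int) then d.insert (PySem.List.pyGetD ep (m : Int) 0) (m : Int) else d).getD (PySem.List.pyGetD sp (m : Int) 0) 0)]
              else out)
            else out))
          (PySem.List.pyRange ((m : Int) - 1) (-1) (-1))).2
        = out ++ ((List.range' 0 (m + 1)).filterMap (pvHit sp ep)).reverse
      generalize hD2 : (if (m : Int) < (ep.length : Int) then d.insert (PySem.List.pyGetD ep (m : Int) 0) (m : Int) else d) = D2 at hd' ⊢
      have hout :
          (if (m : Int) < (sp.length : Int) then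
            (if PySem.List.pyGetD sp (m : Int) 0 ≠ 0 ∧ D2.contains (PySem.List.pyGetD sp (m : Int) 0)
             then out ++ [(PySem.List.pyGetD sp (m : Int) 0, (m : Int), D2.getD (PySem.List.pyGetD sp (m : Int) 0) 0)]
             else out)
           else out) = out ++ (pvHit sp ep m).toList := by
        by_cases hm : m < sp.length
        · have hml : ((m : Int) < (sp.length : Int)) := by exact_mod_cast hm
          have hsm : sp.getD m 0 = sp[m] := List.getD_eq_getElem sp 0 hm
          have hget : PySem.List.pyGetD sp (m : Int) 0 = sp[m] := by
            rw [PySem.List.pyGetD_natCast, hsm]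
          rw [if_pos hml, hget]
          by_cases h0 : sp[m] = 0
          · simp [pvHit, hm, h0]
          · have hcont : D2.contains sp[m] = (pvFm ep sp[m] m).isSome := by
              rw [PySem.Dict.contains_eq_isSome_get?, hd' sp[m]]
              cases pvFm ep sp[m] m <;> simp
            cases hfm : pvFm ep sp[m] m with
            | none =>
                rw [hfm] at hcont
                simp [pvHit, hm, h0, hcont, hfm]
            | some k =>
                rw [hfm] at hcont
                have hgd : D2.getD sp[m] 0 = (k : Int) := by
                  rw [PySem.Dict.getD_eq_get?_getD, hd' sp[m], hfm]; rfl
                simp [pvHit, hm, h0, hcont, hfm, hgd]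
        · have hml : ¬ ((m : Int) < (sp.length : Int)) := by exact_mod_cast hm
          simp [hml, pvHit, hm]
      rw [hout, ih _ _ hd']
      have hr : List.range' 0 (m + 1) = List.range' 0 m ++ [m] := by
        simpa using List.range'_concat (s := 0) (n := m) (step := 1)
      rw [hr, List.filterMap_append, List.reverse_append]
      rcases hpv : pvHit sp ep m with _ | b <;> simp [hpv]

lemma pvHit_none_of_ge (sp ep : List Int) (n : Nat) (h : sp.length ≤ n) : pvHit sp ep n = none := by
  simp [pvHit, Nat.not_lt.mpr h]

-- ===== VERDICT (by name: the statement is the Claim_ definition above) =====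
theorem get_extract_item_spec : Claim_equal_get_extract_item := by
  intro sl el _ _
  unfold Spec_get_extract_item get_extract_item get_extract_item_alt
  set sp := sl.map pvArgmax with hsp
  set ep := el.map pvArgmax with hep
  show (PySem.List.enumerate sp 0).foldl
      (fun (S : List (Int × Int × Int)) (p : Int × Int) =>
        if p.2 = 0 then S
        else
          match pvInnerA p.2 p.1 (PySem.List.enumerate (PySem.List.slice ep (some p.1) none) 0) with
          | some t => S ++ [t]
          | none => S) []
    = ((PySem.List.pyRange (((max sp.length ep.length : Nat) : Int) - 1) (-1) (-1)).foldl
      (fun (st : PySem.Dict Int Int × List (Int × Int × Int)) (i : Int) =>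
        let np := if i < (ep.length : Int) then st.1.insert (PySem.List.pyGetD ep i 0) i else st.1
        let out := if i < (sp.length : Int) then
            let s := PySem.List.pyGetD sp i 0
            if s ≠ 0 ∧ np.contains s then st.2 ++ [(s, i, np.getD s 0)] else st.2
          else st.2
        (np, out)) (PySem.Dict.empty, [])).2.reverse
  have hA := pvAfold sp ep 0 [] (Nat.zero_le _)
  simp only [List.drop_zero, Nat.cast_zero, Nat.sub_zero, List.nil_append] at hA
  rw [hA]
  have hempty : ∀ v, (PySem.Dict.empty : PySem.Dict Int Int).get? v
      = (pvFm ep v (max sp.length ep.length)).map (fun k => (k : Int)) := by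
    intro v
    unfold pvFm
    rw [List.drop_eq_nil_of_le (Nat.le_max_right _ _)]
    simp [PySem.Dict.get?_empty, List.findIdx?_nil]
  have hB := pvBfold sp ep (max sp.length ep.length) PySem.Dict.empty [] hempty
  rw [hB]
  simp only [List.nil_append, List.reverse_reverse]
  have hsplit : List.range' 0 (max sp.length ep.length)
      = List.range' 0 sp.length ++ List.range' sp.length (max sp.length ep.length - sp.length) := by
    rw [show List.range' sp.length (max sp.length ep.length - sp.length) = List.range' (0 + 1 * sp.length) (max sp.length ep.length - sp.length) by congr 1; omega,
        List.range'_append]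
    congr 1
    omega
  rw [hsplit, List.filterMap_append]
  have htail : (List.range' sp.length (max sp.length ep.length - sp.length)).filterMap (pvHit sp ep) = [] := by
    rw [List.filterMap_eq_nil_iff]
    intro n hn
    exact pvHit_none_of_ge sp ep n (List.mem_range'_1.mp hn).1
  rw [htail, List.append_nil]
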